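-- pv_equiv track=rewrite | github.com/azataiot/AZ-OCR-Engine | src/segment.py | extract_peek_ranges_from_array
-- ===== SOURCE A (Python) =====
-- def extract_peek_ranges_from_array(array_vals, minimun_val=10, minimun_range=2):
--     start_i = None
--     end_i = None
--     peek_ranges = []
--     for i, val in enumerate(array_vals):
--         if val > minimun_val and start_i is None:
--             start_i = i
--         elif val > minimun_val and start_i is not None:
--             pass
--         elif val < minimun_val and start_i is not None:
--             end_i = i
--             if end_i - start_i >= minimun_range:
--                 peek_ranges.append((start_i, end_i))
--             start_i = None
--             end_i = None
--         elif val < minimun_val and start_i is None: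
--             pass
--         else:
--             raise ValueError("cannot parse this case...")
--     return peek_ranges
-- ===== SOURCE B (Python) =====
-- def extract_peek_ranges_from_array(array_vals, minimun_val=10, minimun_range=2):
--     # Run-length scan with index jumps: find each maximal run of values above the
--     # threshold in one inner sweep; a run is reported only if it is terminated by
--     # a later below-threshold value (a trailing run is left open, as in A).
--     n = len(array_vals)
--     res = []
--     i = 0
--     while i < n:
--         if array_vals[i] > minimun_val:
--             j = i
--             while j < n and array_vals[j] > minimun_val:
--                 j += 1
--             if j < n and j - i >= minimun_range:
--                 res.append((i, j))
--             i = j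
--         else:
--             i += 1
--     return res
-- ===== Notes on version B (the rewrite author's own statement) =====
-- stated objective: alternative
-- what changed: B replaces A's per-element state machine (optional start index carried through an enumerate loop) by a run-length scan that jumps the index over each maximal above-threshold run and emits the range directly.
import Mathlib
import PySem

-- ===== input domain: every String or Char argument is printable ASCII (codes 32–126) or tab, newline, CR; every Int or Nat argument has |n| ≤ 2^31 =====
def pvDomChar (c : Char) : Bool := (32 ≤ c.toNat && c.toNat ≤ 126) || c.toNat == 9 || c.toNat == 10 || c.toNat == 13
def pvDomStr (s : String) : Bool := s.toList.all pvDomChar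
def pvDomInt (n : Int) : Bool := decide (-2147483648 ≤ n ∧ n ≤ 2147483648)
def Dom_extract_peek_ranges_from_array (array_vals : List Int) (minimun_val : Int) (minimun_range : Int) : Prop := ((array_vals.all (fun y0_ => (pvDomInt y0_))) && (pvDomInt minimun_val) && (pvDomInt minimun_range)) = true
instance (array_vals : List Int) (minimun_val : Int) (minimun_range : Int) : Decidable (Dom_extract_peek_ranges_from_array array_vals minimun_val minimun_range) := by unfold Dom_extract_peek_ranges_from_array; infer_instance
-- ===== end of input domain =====

-- B replaces A's per-element start_i state machine by a run-length scan that jumps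
-- over each maximal above-threshold run; same O(n) cost, alternative structure.

-- ===== PORT A =====
-- A's enumerate loop with state (start_i : Option Nat) and accumulator peek_ranges.
-- The final `else` branch of A raises ValueError (val = minimun_val); Pre_ excludes
-- exactly those inputs, so the returned value there is irrelevant (we return the
-- accumulator so far).
def pvGoA (minimun_val minimun_range : Int) : List Int → Nat → Option Nat → List (Int × Int) → List (Int × Int)
  | [], _, _, peek_ranges => peek_ranges
  | val :: rest, i, start_i, peek_ranges =>
    if val > minimun_val then
      match start_i with
      | none => pvGoA minimun_val minimun_range rest (i + 1) (some i) peek_ranges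
      | some s => pvGoA minimun_val minimun_range rest (i + 1) (some s) peek_ranges
    else if val < minimun_val then
      match start_i with
      | some s =>
          pvGoA minimun_val minimun_range rest (i + 1) none
            (if (i : Int) - (s : Int) ≥ minimun_range then peek_ranges ++ [((s : Int), (i : Int))] else peek_ranges)
      | none => pvGoA minimun_val minimun_range rest (i + 1) none peek_ranges
    else peek_ranges  -- raise ValueError("cannot parse this case...") — outside Pre_

def extract_peek_ranges_from_array (array_vals : List Int) (minimun_val : Int) (minimun_range : Int) : List (Int × Int) :=
  pvGoA minimun_val minimun_range array_vals 0 none []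

-- ===== PORT B =====
-- length of B's inner `while j < n and array_vals[j] > minimun_val` sweep
def pvRunLen (minimun_val : Int) : List Int → Nat
  | [] => 0
  | v :: rest => if v > minimun_val then pvRunLen minimun_val rest + 1 else 0

-- B's outer while loop over the remaining list with absolute index i.
-- `j < n` of Source B is `drop … ≠ []` here (exact: j = i + k, n = i + length).
-- fuel (initially the list length, an upper bound on the outer iterations)
-- only makes the recursion structural; it never alters the computation.
def pvGoB (minimun_val minimun_range : Int) : Nat → List Int → Nat → List (Int × Int)
  | 0, _, _ => []
  | _ + 1, [], _ => []
  | fuel + 1, v :: rest, i =>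
    if v > minimun_val then
      (if ((v :: rest).drop (pvRunLen minimun_val (v :: rest)) ≠ [] ∧
            ((pvRunLen minimun_val (v :: rest) : Int) ≥ minimun_range)) then
          [((i : Int), ((i + pvRunLen minimun_val (v :: rest) : Nat) : Int))] else []) ++
        pvGoB minimun_val minimun_range fuel ((v :: rest).drop (pvRunLen minimun_val (v :: rest)))
          (i + pvRunLen minimun_val (v :: rest))
    else pvGoB minimun_val minimun_range fuel rest (i + 1)

def extract_peek_ranges_from_array_alt (array_vals : List Int) (minimun_val : Int) (minimun_range : Int) : List (Int × Int) :=
  pvGoB minimun_val minimun_range array_vals.length array_vals 0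

-- ===== PRECONDITION & SPEC =====
-- Pre_ excludes exactly the inputs on which A raises ValueError: any element equal
-- to minimun_val hits A's final `else: raise` branch.
def Pre_extract_peek_ranges_from_array (array_vals : List Int) (minimun_val : Int) (minimun_range : Int) : Prop :=
  ∀ v ∈ array_vals, v ≠ minimun_val

instance (array_vals : List Int) (minimun_val : Int) (minimun_range : Int) : Decidable (Pre_extract_peek_ranges_from_array array_vals minimun_val minimun_range) := by unfold Pre_extract_peek_ranges_from_array; infer_instance

def pvWitness_extract_peek_ranges_from_array : List Int × Int × Int := ([0, 20, 20, 0], 10, 2)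

def Spec_extract_peek_ranges_from_array (array_vals : List Int) (minimun_val : Int) (minimun_range : Int) (out : List (Int × Int)) : Prop := out = extract_peek_ranges_from_array_alt array_vals minimun_val minimun_range
instance (array_vals : List Int) (minimun_val : Int) (minimun_range : Int) (out : List (Int × Int)) : Decidable (Spec_extract_peek_ranges_from_array array_vals minimun_val minimun_range out) := by unfold Spec_extract_peek_ranges_from_array; infer_instance

-- ===== CLAIM (what is proved, stated in full; the proofs are below) =====
def Claim_equal_extract_peek_ranges_from_array : Prop := ∀ (array_vals : List Int) (minimun_val : Int) (minimun_range : Int), Dom_extract_peek_ranges_from_array array_vals minimun_val minimun_range → Pre_extract_peek_ranges_from_array array_vals minimun_val minimun_range → Spec_extract_peek_ranges_from_array array_vals minimun_val minimun_range (extract_peek_ranges_from_array array_vals minimun_val minimun_range)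

-- ===== LEMMAS AND PROOFS =====

-- the element just after a maximal run is not above the threshold
lemma pvRunLen_drop_head (mv : Int) : ∀ (l : List Int) (b : Int) (t : List Int),
    l.drop (pvRunLen mv l) = b :: t → ¬ b > mv := by
  intro l
  induction l with
  | nil => intro b t h; simp [pvRunLen] at h
  | cons v rest ih =>
    intro b t h
    by_cases hv : v > mv
    · rw [show pvRunLen mv (v :: rest) = pvRunLen mv rest + 1 from by simp [pvRunLen, hv],
        List.drop_succ_cons] at h
      exact ih b t h
    · rw [show pvRunLen mv (v :: rest) = 0 from by simp [pvRunLen, hv], List.drop_zero] at h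
      cases h; exact hv

-- A in the active state consumes the current run, then returns the accumulator
-- if the run is trailing …
lemma pvGoA_active_nil (mv mr : Int) : ∀ (l : List Int),
    l.drop (pvRunLen mv l) = [] →
    ∀ (i s : Nat) (acc : List (Int × Int)), pvGoA mv mr l i (some s) acc = acc := by
  intro l
  induction l with
  | nil => intro _ i s acc; simp [pvGoA]
  | cons v rest ih =>
    intro hd i s acc
    by_cases hv : v > mv
    · rw [show pvRunLen mv (v :: rest) = pvRunLen mv rest + 1 from by simp [pvRunLen, hv],
        List.drop_succ_cons] at hd
      simp only [pvGoA, if_pos hv]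
      exact ih hd (i + 1) s acc
    · rw [show pvRunLen mv (v :: rest) = 0 from by simp [pvRunLen, hv], List.drop_zero] at hd
      cases hd

-- … or closes at the terminating below-threshold element
lemma pvGoA_active_cons (mv mr : Int) : ∀ (l : List Int) (b : Int) (t : List Int), (∀ v ∈ l, v ≠ mv) →
    l.drop (pvRunLen mv l) = b :: t →
    ∀ (i s : Nat) (acc : List (Int × Int)),
      pvGoA mv mr l i (some s) acc =
        pvGoA mv mr t (i + pvRunLen mv l + 1) none
          (if ((i + pvRunLen mv l : Nat) : Int) - (s : Int) ≥ mr then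
              acc ++ [((s : Int), ((i + pvRunLen mv l : Nat) : Int))] else acc) := by
  intro l
  induction l with
  | nil => intro b t _ h; simp [pvRunLen] at h
  | cons v rest ih =>
    intro b t hc hd i s acc
    by_cases hv : v > mv
    · have hk : pvRunLen mv (v :: rest) = pvRunLen mv rest + 1 := by simp [pvRunLen, hv]
      rw [hk] at hd ⊢
      rw [List.drop_succ_cons] at hd
      simp only [pvGoA, if_pos hv]
      rw [ih b t (fun x hx => hc x (List.mem_cons_of_mem _ hx)) hd (i + 1) s acc]
      rw [show i + 1 + pvRunLen mv rest = i + (pvRunLen mv rest + 1) from by omega]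
    · have hk : pvRunLen mv (v :: rest) = 0 := by simp [pvRunLen, hv]
      rw [hk] at hd ⊢
      rw [List.drop_zero] at hd
      cases hd
      have hlt : v < mv := by
        rcases lt_or_eq_of_le (not_lt.mp hv) with h | h
        · exact h
        · exact absurd h (hc v List.mem_cons_self)
      simp only [pvGoA, if_neg hv, if_pos hlt]
      norm_num

-- main invariant: A's loop from the inactive state equals B's outer loop
lemma pvGoA_eq_goB (mv mr : Int) : ∀ (n : Nat) (l : List Int) (fuel : Nat),
    l.length ≤ n → l.length ≤ fuel →
    (∀ v ∈ l, v ≠ mv) → ∀ (i : Nat) (acc : List (Int × Int)),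
    pvGoA mv mr l i none acc = acc ++ pvGoB mv mr fuel l i := by
  intro n
  induction n with
  | zero =>
    intro l fuel hl _ _ i acc
    have : l = [] := List.eq_nil_of_length_eq_zero (Nat.le_zero.mp hl)
    subst this
    cases fuel <;> simp [pvGoA, pvGoB]
  | succ n ih =>
    intro l fuel hl hf hc i acc
    cases l with
    | nil => cases fuel <;> simp [pvGoA, pvGoB]
    | cons v rest =>
      obtain ⟨fu, rfl⟩ : ∃ fu, fuel = fu + 1 := by
        cases fuel
        · simp at hf
        · exact ⟨_, rfl⟩
      by_cases hv : v > mv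
      · -- A enters the active state at i; B sweeps the whole run
        have hk : pvRunLen mv (v :: rest) = pvRunLen mv rest + 1 := by simp [pvRunLen, hv]
        have hcr : ∀ x ∈ rest, x ≠ mv := fun x hx => hc x (List.mem_cons_of_mem _ hx)
        rw [show pvGoA mv mr (v :: rest) i none acc = pvGoA mv mr rest (i + 1) (some i) acc from by
          simp [pvGoA, hv]]
        rw [pvGoB]
        simp only [if_pos hv, hk, List.drop_succ_cons]
        cases hd : rest.drop (pvRunLen mv rest) with
        | nil =>
          rw [pvGoA_active_nil mv mr rest hd]
          cases fu <;> simp [pvGoB]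
        | cons b t =>
          have hb : ¬ b > mv := pvRunLen_drop_head mv rest b t hd
          have hbmem : b ∈ rest := List.mem_of_mem_drop (by rw [hd]; exact List.mem_cons_self)
          have hlen := congrArg List.length hd
          rw [List.length_drop] at hlen
          simp only [List.length_cons] at hlen hl hf
          obtain ⟨fu2, rfl⟩ : ∃ fu2, fu = fu2 + 1 := by
            cases fu
            · omega
            · exact ⟨_, rfl⟩
          have htlen : t.length ≤ n := by omega
          have htfuel : t.length ≤ fu2 := by omega
          have htc : ∀ x ∈ t, x ≠ mv := fun x hx =>
            hcr x (List.mem_of_mem_drop (by rw [hd]; exact List.mem_cons_of_mem _ hx))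
          rw [pvGoA_active_cons mv mr rest b t hcr hd]
          rw [show i + 1 + pvRunLen mv rest = i + (pvRunLen mv rest + 1) from by omega]
          rw [ih t fu2 htlen htfuel htc]
          rw [show pvGoB mv mr (fu2 + 1) (b :: t) (i + (pvRunLen mv rest + 1)) =
              pvGoB mv mr fu2 t (i + (pvRunLen mv rest + 1) + 1) from by
            rw [pvGoB]; simp [hb]]
          split_ifs with h1 h2 h2
          · simp [List.append_assoc]
          · exact absurd ⟨List.cons_ne_nil _ _, by push_cast at h1 ⊢; omega⟩ h2
          · rcases h2 with ⟨-, h2⟩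
            exact absurd (by push_cast at h2 ⊢; omega : ((i + (pvRunLen mv rest + 1) : Nat) : Int) - (i : Nat) ≥ mr) h1
          · simp
      · -- below the threshold in the inactive state: both just advance
        have hlt : v < mv := by
          rcases lt_or_eq_of_le (not_lt.mp hv) with h | h
          · exact h
          · exact absurd h (hc v List.mem_cons_self)
        simp only [pvGoA, if_neg hv, if_pos hlt]
        rw [pvGoB]
        simp only [if_neg hv]
        exact ih rest fu (by simp at hl; omega) (by simp at hf; omega)
          (fun x hx => hc x (List.mem_cons_of_mem _ hx)) (i + 1) acc

-- ===== VERDICT (by name: the statement is the Claim_ definition above) =====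
theorem extract_peek_ranges_from_array_spec : Claim_equal_extract_peek_ranges_from_array := by
  intro array_vals minimun_val minimun_range _ hpre
  unfold Spec_extract_peek_ranges_from_array extract_peek_ranges_from_array extract_peek_ranges_from_array_alt
  simpa using pvGoA_eq_goB minimun_val minimun_range array_vals.length array_vals array_vals.length le_rfl le_rfl hpre 0 []
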